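-- pv_equiv track=rewrite | github.com/nguyentieuat/ai-korean-study-partner | ai-korean-be/tts_service/edge_tts_ko.py | pick_voice
-- ===== SOURCE A (Python) =====
-- from typing import List, Optional
--
-- DEFAULT_FEMALE = "ko-KR-SunHiNeural"
--
-- DEFAULT_MALE   = "ko-KR-InJoonNeural"
--
-- def pick_voice(explicit: Optional[str], want_male: bool, want_female: bool, available: List[dict]) -> str:
--     if explicit:
--         return explicit
--     preferred = DEFAULT_MALE if want_male else DEFAULT_FEMALE
--     shortnames = {v.get("ShortName") for v in available if v.get("ShortName")}
--     if preferred in shortnames: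
--         return preferred
--     for v in available:
--         if v.get("Locale") == "ko-KR":
--             if want_male and v.get("Gender") == "Male":
--                 return v.get("ShortName")
--             if want_female and v.get("Gender") == "Female":
--                 return v.get("ShortName")
--     for v in available:
--         if v.get("Locale") == "ko-KR":
--             return v.get("ShortName")
--     raise RuntimeError("No Korean voices found. Try --list-voices --all to inspect availability.")
-- ===== SOURCE B (Python) =====
-- DEFAULT_FEMALE = "ko-KR-SunHiNeural"
-- DEFAULT_MALE = "ko-KR-InJoonNeural"
--
-- _MISSING = object()
--
--
-- def pick_voice(explicit, want_male, want_female, available):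
--     if explicit:
--         return explicit
--     preferred = DEFAULT_MALE if want_male else DEFAULT_FEMALE
--     preferred_found = False
--     gender_match = _MISSING
--     any_ko = _MISSING
--     for v in available:
--         sn = v.get("ShortName")
--         if sn == preferred:
--             preferred_found = True
--         if v.get("Locale") == "ko-KR":
--             if gender_match is _MISSING and (
--                 (want_male and v.get("Gender") == "Male")
--                 or (want_female and v.get("Gender") == "Female")
--             ):
--                 gender_match = sn
--             if any_ko is _MISSING:
--                 any_ko = sn
--     if preferred_found:
--         return preferred
--     if gender_match is not _MISSING:
--         return gender_match
--     if any_ko is not _MISSING: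
--         return any_ko
--     raise RuntimeError("No Korean voices found. Try --list-voices --all to inspect availability.")
-- ===== Notes on version B (the rewrite author's own statement) =====
-- stated objective: alternative
-- what changed: B replaces A's build-a-set-of-ShortNames pass plus two further scans over available with one single loop that simultaneously tracks whether the preferred ShortName occurs, the first gender-matching ko-KR voice, and the first ko-KR voice, deciding among the three after the loop.
import Mathlib
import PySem

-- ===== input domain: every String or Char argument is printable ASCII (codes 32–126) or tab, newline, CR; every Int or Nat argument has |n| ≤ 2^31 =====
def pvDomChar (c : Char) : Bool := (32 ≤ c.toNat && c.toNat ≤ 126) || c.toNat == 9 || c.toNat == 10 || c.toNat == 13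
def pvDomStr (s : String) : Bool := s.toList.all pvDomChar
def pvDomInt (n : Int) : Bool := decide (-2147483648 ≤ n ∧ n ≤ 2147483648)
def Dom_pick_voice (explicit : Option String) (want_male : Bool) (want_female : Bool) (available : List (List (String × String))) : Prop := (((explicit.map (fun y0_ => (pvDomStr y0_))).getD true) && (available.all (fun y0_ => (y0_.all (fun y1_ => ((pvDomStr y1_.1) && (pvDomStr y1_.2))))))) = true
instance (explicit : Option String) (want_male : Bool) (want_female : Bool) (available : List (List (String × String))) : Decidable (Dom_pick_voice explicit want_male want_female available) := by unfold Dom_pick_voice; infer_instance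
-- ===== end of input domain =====

-- ===== PORT A =====
-- B replaces A's set-build + two scans with a single fold; equivalence proved on Pre_ (A's non-raising, str-returning inputs).
def pvA_DEFAULT_FEMALE : String := "ko-KR-SunHiNeural"
def pvA_DEFAULT_MALE : String := "ko-KR-InJoonNeural"

-- A's first for-loop: first ko-KR voice matching the wanted gender
def pvAgenderLoop (want_male : Bool) (want_female : Bool) : List (List (String × String)) → Option String
  | [] => none
  | v :: rest =>
    if (PySem.Dict.mk v).get? "Locale" == some "ko-KR" then
      if want_male && ((PySem.Dict.mk v).get? "Gender" == some "Male") then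
        some (((PySem.Dict.mk v).get? "ShortName").getD "")
      else if want_female && ((PySem.Dict.mk v).get? "Gender" == some "Female") then
        some (((PySem.Dict.mk v).get? "ShortName").getD "")
      else pvAgenderLoop want_male want_female rest
    else pvAgenderLoop want_male want_female rest

-- A's second for-loop: first ko-KR voice
def pvAkoLoop : List (List (String × String)) → Option String
  | [] => none
  | v :: rest =>
    if (PySem.Dict.mk v).get? "Locale" == some "ko-KR" then
      some (((PySem.Dict.mk v).get? "ShortName").getD "")
    else pvAkoLoop rest

-- missing "ShortName" on the returned voice (Python: returns None) is excluded by Pre_, so .getD "" is exact there;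
-- the final RuntimeError is excluded by Pre_ too.
def pick_voice (explicit : Option String) (want_male : Bool) (want_female : Bool) (available : List (List (String × String))) : String :=
  if explicit.getD "" ≠ "" then explicit.getD ""   -- `if explicit:` (None and "" are falsy)
  else
    let preferred := if want_male then pvA_DEFAULT_MALE else pvA_DEFAULT_FEMALE
    let shortnames : PySem.Set String :=
      PySem.Set.ofList ((available.filterMap (fun v => (PySem.Dict.mk v).get? "ShortName")).filter (fun s => s ≠ ""))
    if preferred ∈ shortnames then preferred
    else
      match pvAgenderLoop want_male want_female available with
      | some s => s
      | none =>
        match pvAkoLoop available with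
        | some s => s
        | none => ""   -- Python raises RuntimeError here; Pre_ excludes these inputs

-- ===== PORT B =====
def pvB_DEFAULT_FEMALE : String := "ko-KR-SunHiNeural"
def pvB_DEFAULT_MALE : String := "ko-KR-InJoonNeural"

-- one step of B's single loop; state = (preferred_found, gender_match, any_ko)
def pvBstep (preferred : String) (want_male : Bool) (want_female : Bool)
    (st : Bool × Option String × Option String) (v : List (String × String)) :
    Bool × Option String × Option String :=
  let sn := (PySem.Dict.mk v).get? "ShortName"
  let pf := st.1 || (sn == some preferred)
  let gm :=
    if st.2.1.isNone && ((PySem.Dict.mk v).get? "Locale" == some "ko-KR")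
        && ((want_male && ((PySem.Dict.mk v).get? "Gender" == some "Male"))
            || (want_female && ((PySem.Dict.mk v).get? "Gender" == some "Female"))) then
      some (sn.getD "")   -- stored ShortName; missing key excluded by Pre_
    else st.2.1
  let ko :=
    if st.2.2.isNone && ((PySem.Dict.mk v).get? "Locale" == some "ko-KR") then
      some (sn.getD "")
    else st.2.2
  (pf, gm, ko)

def pick_voice_alt (explicit : Option String) (want_male : Bool) (want_female : Bool) (available : List (List (String × String))) : String :=
  if explicit.getD "" ≠ "" then explicit.getD ""
  else
    let preferred := if want_male then pvB_DEFAULT_MALE else pvB_DEFAULT_FEMALE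
    let st := available.foldl (pvBstep preferred want_male want_female) (false, none, none)
    if st.1 then preferred
    else
      match st.2.1 with
      | some s => s
      | none =>
        match st.2.2 with
        | some s => s
        | none => ""   -- Python raises RuntimeError here; Pre_ excludes these inputs

-- ===== PRECONDITION & SPEC =====
-- Pre_ excludes the inputs where A raises RuntimeError (no truthy explicit, no voice with the preferred
-- ShortName, no ko-KR voice) and, conservatively, inputs where some ko-KR voice lacks a "ShortName" key,
-- on which A can return None instead of a str.
def Pre_pick_voice (explicit : Option String) (want_male : Bool) (want_female : Bool) (available : List (List (String × String))) : Prop :=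
  explicit.getD "" ≠ "" ∨
  (∃ v ∈ available, (PySem.Dict.mk v).get? "ShortName" = some (if want_male then "ko-KR-InJoonNeural" else "ko-KR-SunHiNeural")) ∨
  ((∃ v ∈ available, (PySem.Dict.mk v).get? "Locale" = some "ko-KR") ∧
   ∀ v ∈ available, (PySem.Dict.mk v).get? "Locale" = some "ko-KR" → ((PySem.Dict.mk v).get? "ShortName").isSome)
instance (explicit : Option String) (want_male : Bool) (want_female : Bool) (available : List (List (String × String))) : Decidable (Pre_pick_voice explicit want_male want_female available) := by unfold Pre_pick_voice; infer_instance

def pvWitness_pick_voice : Option String × Bool × Bool × (List (List (String × String))) :=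
  (none, true, false, [[("Locale", "ko-KR"), ("Gender", "Male"), ("ShortName", "ko-KR-InJoonNeural")]])

def Spec_pick_voice (explicit : Option String) (want_male : Bool) (want_female : Bool) (available : List (List (String × String))) (out : String) : Prop := out = pick_voice_alt explicit want_male want_female available
instance (explicit : Option String) (want_male : Bool) (want_female : Bool) (available : List (List (String × String))) (out : String) : Decidable (Spec_pick_voice explicit want_male want_female available out) := by unfold Spec_pick_voice; infer_instance

-- ===== CLAIM (what is proved, stated in full; the proofs are below) =====
def Claim_equal_pick_voice : Prop := ∀ (explicit : Option String) (want_male : Bool) (want_female : Bool) (available : List (List (String × String))), Dom_pick_voice explicit want_male want_female available → Pre_pick_voice explicit want_male want_female available → Spec_pick_voice explicit want_male want_female available (pick_voice explicit want_male want_female available)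

-- ===== LEMMAS AND PROOFS =====

-- B's fold computes (pf || any ShortName==preferred, gm else A's first loop, ko else A's second loop)
theorem pvBfold_spec (p : String) (wm wf : Bool) :
    ∀ (l : List (List (String × String))) (pf : Bool) (gm ko : Option String),
    l.foldl (pvBstep p wm wf) (pf, gm, ko)
      = (pf || l.any (fun v => (PySem.Dict.mk v).get? "ShortName" == some p),
         gm.orElse (fun _ => pvAgenderLoop wm wf l),
         ko.orElse (fun _ => pvAkoLoop l)) := by
  intro l
  induction l with
  | nil =>
    intro pf gm ko
    cases gm <;> cases ko <;>
      simp [pvAgenderLoop, pvAkoLoop, Option.orElse]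
  | cons v rest ih =>
    intro pf gm ko
    rw [List.foldl_cons, ih]
    cases gm <;> cases ko <;>
      simp only [pvBstep, pvAgenderLoop, pvAkoLoop, Option.isNone, Option.orElse, Option.getD,
                 List.any_cons, Bool.or_assoc, Bool.true_and, Bool.false_and] <;>
      cases wm <;> cases wf <;> split_ifs <;> simp_all

-- ===== VERDICT (by name: the statement is the Claim_ definition above) =====
theorem pick_voice_spec : Claim_equal_pick_voice := by
  intro ex wm wf av _ _
  unfold Spec_pick_voice pick_voice pick_voice_alt
  by_cases h : ex.getD "" ≠ ""
  · simp [h]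
  · simp only [h, if_false]
    rw [pvBfold_spec]
    have hmem : ((if wm then pvA_DEFAULT_MALE else pvA_DEFAULT_FEMALE) ∈
        PySem.Set.ofList ((av.filterMap (fun v => (PySem.Dict.mk v).get? "ShortName")).filter (fun s => decide (s ≠ ""))))
        ↔ (av.any (fun v => (PySem.Dict.mk v).get? "ShortName" == some (if wm then pvB_DEFAULT_MALE else pvB_DEFAULT_FEMALE)) = true) := by
      rw [PySem.Set.mem_ofList, List.any_eq_true]
      constructor
      · intro hm
        rcases List.mem_filter.mp hm with ⟨hm2, -⟩
        rcases List.mem_filterMap.mp hm2 with ⟨v, hv, hget⟩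
        exact ⟨v, hv, by cases wm <;> simp_all [pvA_DEFAULT_MALE, pvA_DEFAULT_FEMALE, pvB_DEFAULT_MALE, pvB_DEFAULT_FEMALE]⟩
      · rintro ⟨v, hv, hget⟩
        refine List.mem_filter.mpr ⟨List.mem_filterMap.mpr ⟨v, hv, ?_⟩, ?_⟩ <;>
          cases wm <;> simp_all [pvA_DEFAULT_MALE, pvA_DEFAULT_FEMALE, pvB_DEFAULT_MALE, pvB_DEFAULT_FEMALE]
    by_cases hp : av.any (fun v => (PySem.Dict.mk v).get? "ShortName" == some (if wm then pvB_DEFAULT_MALE else pvB_DEFAULT_FEMALE)) = true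
    · simp only [hp, hmem.mpr hp, if_true]
      cases wm <;> simp [pvA_DEFAULT_MALE, pvA_DEFAULT_FEMALE, pvB_DEFAULT_MALE, pvB_DEFAULT_FEMALE]
    · have hm' : ¬ ((if wm then pvA_DEFAULT_MALE else pvA_DEFAULT_FEMALE) ∈
          PySem.Set.ofList ((av.filterMap (fun v => (PySem.Dict.mk v).get? "ShortName")).filter (fun s => decide (s ≠ "")))) :=
        fun hc => hp (hmem.mp hc)
      simp only [hp, hm', if_false]
      cases pvAgenderLoop wm wf av <;> cases pvAkoLoop av <;> simp [Option.orElse]
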